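-- pv_equiv track=rewrite | github.com/Donny-GUI/moonsnake | transpile/astmaker.py | _target_name_helper
-- ===== SOURCE A (Python) =====
-- def _target_name_helper(target_string:str):
--
--         index = target_string[0]
--         name = ""
--         for char in target_string[1:]:
--             if char in index:
--                 index+=char
--             else:
--                 name+=char
--
--         return index, name
-- ===== SOURCE B (Python) =====
-- def _target_name_helper(target_string: str):
--     fc = target_string[0]
--     rest = target_string[1:]
--     return fc * (rest.count(fc) + 1), rest.replace(fc, "")
-- ===== Notes on version B (the rewrite author's own statement) =====
-- stated objective: faster
-- what changed: Replaces the per-character loop with membership test and two string accumulators by whole-string operations: since only copies of the first character ever enter `index`, the result is fc*(rest.count(fc)+1) and rest.replace(fc, '').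
import Mathlib
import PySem

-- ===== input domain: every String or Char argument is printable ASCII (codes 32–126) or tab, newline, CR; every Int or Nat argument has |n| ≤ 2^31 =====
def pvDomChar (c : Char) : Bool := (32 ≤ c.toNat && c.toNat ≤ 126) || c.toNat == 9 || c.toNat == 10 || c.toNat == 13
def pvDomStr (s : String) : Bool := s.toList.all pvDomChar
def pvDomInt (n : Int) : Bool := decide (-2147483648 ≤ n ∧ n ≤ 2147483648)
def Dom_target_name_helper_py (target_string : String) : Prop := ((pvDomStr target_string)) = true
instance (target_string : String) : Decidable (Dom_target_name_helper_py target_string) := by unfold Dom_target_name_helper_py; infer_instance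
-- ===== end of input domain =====

-- B replaces A's per-character loop (membership test + two accumulators) by whole-string
-- count/replace on the tail; equivalence of the RETURN value is proved on non-empty strings
-- (A raises IndexError on ""). The Python tuple (index, name) is ported as a 2-element list.

-- ===== PORT A =====
-- the loop body: 'if char in index: index += char else: name += char'
def target_name_helper_py_step (st : List Char × List Char) (ch : Char) : List Char × List Char :=
  if st.1.contains ch then (st.1 ++ [ch], st.2) else (st.1, st.2 ++ [ch])

def target_name_helper_py (target_string : String) : List String :=
  match target_string.toList with
  | [] => []  -- unreachable under Pre_: Python raises IndexError at target_string[0]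
  | c :: rest =>
    let st := rest.foldl target_name_helper_py_step ([c], [])
    [String.ofList st.1, String.ofList st.2]

-- ===== PORT B =====
def target_name_helper_py_alt (target_string : String) : List String :=
  match target_string.toList with
  | [] => []  -- unreachable under Pre_: Python raises IndexError at target_string[0]
  | c :: rest =>
    -- fc * (rest.count(fc) + 1)  and  rest.replace(fc, "")
    [String.ofList (List.replicate (rest.count c + 1) c), String.ofList (rest.filter (fun ch => ch != c))]

-- ===== PRECONDITION & SPEC =====
-- A raises IndexError on the empty string (target_string[0]); nothing else raises.
def Pre_target_name_helper_py (target_string : String) : Prop := target_string ≠ ""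
instance (target_string : String) : Decidable (Pre_target_name_helper_py target_string) := by unfold Pre_target_name_helper_py; infer_instance
def pvWitness_target_name_helper_py : String := "aab"

def Spec_target_name_helper_py (target_string : String) (out : List String) : Prop := out = target_name_helper_py_alt target_string
instance (target_string : String) (out : List String) : Decidable (Spec_target_name_helper_py target_string out) := by unfold Spec_target_name_helper_py; infer_instance

-- ===== CLAIM (what is proved, stated in full; the proofs are below) =====
def Claim_equal_target_name_helper_py : Prop := ∀ (target_string : String), Dom_target_name_helper_py target_string → Pre_target_name_helper_py target_string → Spec_target_name_helper_py target_string (target_name_helper_py target_string)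

-- ===== LEMMAS AND PROOFS =====

-- loop invariant: once `index` is a non-empty run of c's, it stays one, and the fold
-- computes exactly B's count/filter decomposition of the remaining characters.
theorem tnh_invariant (rest : List Char) (c : Char) :
    ∀ (k : Nat) (acc : List Char),
      rest.foldl target_name_helper_py_step (List.replicate (k + 1) c, acc)
        = (List.replicate (k + 1 + rest.count c) c, acc ++ rest.filter (fun ch => ch != c)) := by
  induction rest with
  | nil => intro k acc; simp [List.count]
  | cons ch t ih =>
    intro k acc
    by_cases h : ch = c
    · subst h
      have hstep : target_name_helper_py_step (List.replicate (k + 1) ch, acc) ch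
          = (List.replicate (k + 2) ch, acc) := by
        simp [target_name_helper_py_step, List.replicate_succ' (n := k + 1)]
      rw [List.foldl_cons, hstep, ih (k + 1) acc]
      simp
      omega
    · have hstep : target_name_helper_py_step (List.replicate (k + 1) c, acc) ch
          = (List.replicate (k + 1) c, acc ++ [ch]) := by
        simp [target_name_helper_py_step, List.contains_eq_mem, List.mem_replicate, h]
      rw [List.foldl_cons, hstep, ih k (acc ++ [ch])]
      simp [h]

-- ===== VERDICT (by name: the statement is the Claim_ definition above) =====
theorem target_name_helper_py_spec : Claim_equal_target_name_helper_py := by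
  intro s _ hpre
  unfold Spec_target_name_helper_py target_name_helper_py target_name_helper_py_alt
  cases hs : s.toList with
  | nil =>
    exact absurd (String.ext (by simp [hs])) hpre
  | cons c rest =>
    have h := tnh_invariant rest c 0 []
    simp only [Nat.zero_add, List.replicate_one, List.nil_append, Nat.add_comm 1] at h
    simp [h]
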